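-- pv_equiv track=rewrite | github.com/bblais/Game | Game/mcts.py | top_choice
-- ===== SOURCE A (Python) =====
-- def argmax(v):
--
--     y=list(zip(v,list(range(len(v)))))
--     return max(y)[1]
--
-- def top_choice(choices,weights=None):
--
--     if isinstance(choices,dict):  # given a dictionary
--         Q=choices
--         choices=[]
--         weights=[]
--         for key in list(Q.keys()):
--             if isinstance(key,tuple):
--                 choices.append(list(key))
--             else:
--                 choices.append(key)
--             weights.append(Q[key])
--
--     i=argmax(weights)
--     return choices[i]
-- ===== SOURCE B (Python) =====
-- def top_choice(choices, weights=None):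
--     if isinstance(choices, dict):  # given a dictionary
--         best = None
--         for key, w in choices.items():
--             c = list(key) if isinstance(key, tuple) else key
--             if best is None or w >= best[0]:
--                 best = (w, c)
--         return best[1]
--     best = None
--     for i, w in enumerate(weights):
--         if best is None or w >= best[0]:
--             best = (w, i)
--     return choices[best[1]]
-- ===== Notes on version B (the rewrite author's own statement) =====
-- stated objective: simpler
-- what changed: Replaces the build-parallel-(value,index)-pairs-then-max-then-index structure with a single pass over enumerate(weights) that keeps the running best (weight, index), updating on >= so the last maximum wins like max((weight, index)), then indexes choices once.
import Mathlib
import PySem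

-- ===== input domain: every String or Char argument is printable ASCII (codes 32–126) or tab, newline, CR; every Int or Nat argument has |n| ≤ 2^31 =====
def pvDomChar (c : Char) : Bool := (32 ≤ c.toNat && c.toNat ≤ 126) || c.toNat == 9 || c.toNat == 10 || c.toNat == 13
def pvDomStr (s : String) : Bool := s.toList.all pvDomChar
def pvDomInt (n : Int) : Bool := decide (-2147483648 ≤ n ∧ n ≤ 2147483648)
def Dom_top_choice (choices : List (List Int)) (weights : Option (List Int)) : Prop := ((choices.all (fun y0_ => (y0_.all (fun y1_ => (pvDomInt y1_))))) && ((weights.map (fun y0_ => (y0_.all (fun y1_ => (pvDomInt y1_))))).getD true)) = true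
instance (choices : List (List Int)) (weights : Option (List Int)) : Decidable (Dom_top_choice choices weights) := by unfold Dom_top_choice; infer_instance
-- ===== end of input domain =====

-- B replaces A's build-(value,index)-pairs-then-max-then-index structure by one pass over
-- enumerate(weights) keeping the running best (weight, index) (update on ≥, so the last
-- maximum wins), then a single index into choices; objective: simpler.
-- The dict branch of the Python is unreachable at the ported type (choices : List (List Int)).

-- ===== PORT A =====
-- argmax(v): y = list(zip(v, range(len(v)))); return max(y)[1].
-- max(y) on int pairs is lexicographic max, first extremal = PySem.List.max2? with component keys.
def pvArgmax (v : List Int) : Option Int :=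
  (PySem.List.max2? (v.zip (PySem.List.pyRange 0 (PySem.List.len v) 1))
    (fun p => p.1) (fun p => p.2)).map (fun p => p.2)

def top_choice (choices : List (List Int)) (weights : Option (List Int)) : List Int :=
  match weights with
  | none => []          -- Python: len(None) raises TypeError; outside Pre_
  | some ws =>
    match pvArgmax ws with
    | none => []        -- max of empty sequence raises ValueError; outside Pre_
    | some i => PySem.List.pyGetD choices i []   -- choices[i]; IndexError is outside Pre_

-- ===== PORT B =====
-- state = best (weight, index); step on p = (i, w) from enumerate: update when w >= best weight
def pvStepB (best : Option (Int × Int)) (p : Int × Int) : Option (Int × Int) :=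
  match best with
  | none => some (p.2, p.1)
  | some b => if b.1 ≤ p.2 then some (p.2, p.1) else some b

def top_choice_alt (choices : List (List Int)) (weights : Option (List Int)) : List Int :=
  match weights with
  | none => []          -- enumerate(None) raises TypeError; outside Pre_
  | some ws =>
    match (PySem.List.enumerate ws 0).foldl pvStepB none with
    | none => []        -- best is None: best[1] raises TypeError; outside Pre_
    | some b => PySem.List.pyGetD choices b.2 []   -- choices[best[1]]; IndexError outside Pre_

-- ===== PRECONDITION & SPEC =====
-- Pre_: weights is a nonempty list and the index of its LAST maximum is a valid index into
-- choices — exactly the inputs where the Python A returns (elsewhere it raises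
-- TypeError/ValueError/IndexError, and B raises there too).
def Pre_top_choice (choices : List (List Int)) (weights : Option (List Int)) : Prop :=
  match weights with
  | none => False
  | some ws => ∃ i ∈ List.range ws.length,
      i < choices.length ∧
      (∀ j ∈ List.range ws.length, ws.getD j 0 ≤ ws.getD i 0) ∧
      (∀ j ∈ List.range ws.length, i < j → ws.getD j 0 < ws.getD i 0)

instance (choices : List (List Int)) (weights : Option (List Int)) : Decidable (Pre_top_choice choices weights) := by
  unfold Pre_top_choice; cases weights <;> infer_instance

def pvWitness_top_choice : List (List Int) × Option (List Int) := ([[1], [2]], some [5, 3])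

def Spec_top_choice (choices : List (List Int)) (weights : Option (List Int)) (out : List Int) : Prop := out = top_choice_alt choices weights
instance (choices : List (List Int)) (weights : Option (List Int)) (out : List Int) : Decidable (Spec_top_choice choices weights out) := by unfold Spec_top_choice; infer_instance

-- ===== CLAIM =====
def Claim_equal_top_choice : Prop := ∀ (choices : List (List Int)) (weights : Option (List Int)), Dom_top_choice choices weights → Pre_top_choice choices weights → Spec_top_choice choices weights (top_choice choices weights)

-- ===== LEMMAS AND PROOFS =====

-- A's fold step (the body of max2? at component keys), named for the proofs.
def pvStepA (acc : Option (Int × Int)) (x : Int × Int) : Option (Int × Int) :=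
  match acc with
  | none => some x
  | some m =>
    if (decide (m.1 < x.1) || !decide (x.1 < m.1) && decide (m.2 < x.2)) = true then some x else some m

lemma pvMax2_eq_foldl (y : List (Int × Int)) :
    PySem.List.max2? y (fun p => p.1) (fun p => p.2) = y.foldl pvStepA none := by
  unfold PySem.List.max2? pvStepA
  congr 1
  funext acc x
  cases acc <;> rfl

-- Lock step: over strictly increasing indices, A's lexicographic update and B's ≥-update fire on
-- exactly the same steps, and both accumulators carry the same (weight, index) pair.
lemma pvLock (t : List Int) (a b w i : Int)
    (hb : a + (t.length : Int) ≤ b) (hia : i < a) :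
    (t.zip (PySem.List.pyRange a b 1)).foldl pvStepA (some (w, i)) =
      (PySem.List.enumerate t a).foldl pvStepB (some (w, i)) := by
  induction t generalizing a w i with
  | nil => simp [PySem.List.enumerate_nil]
  | cons x tt ih =>
    have hab : a < b := by
      have h1 : ((x :: tt).length : Int) = (tt.length : Int) + 1 := by
        push_cast [List.length_cons]; ring
      have : (0:Int) ≤ tt.length := by positivity
      omega
    rw [PySem.List.pyRange_one_cons hab, PySem.List.enumerate_cons]
    simp only [List.zip_cons_cons, List.foldl_cons]
    have hb' : (a + 1) + (tt.length : Int) ≤ b := by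
      have h1 : ((x :: tt).length : Int) = (tt.length : Int) + 1 := by
        push_cast [List.length_cons]; ring
      omega
    by_cases hwx : w ≤ x
    · have hA : pvStepA (some (w, i)) (x, a) = some (x, a) := by
        simp only [pvStepA]
        have : (decide (w < x) || !decide (x < w) && decide (i < a)) = true := by
          rcases lt_or_eq_of_le hwx with h | h
          · simp [h]
          · subst h; simp [hia]
        simp [this]
      have hB : pvStepB (some (w, i)) (a, x) = some (x, a) := by
        simp [pvStepB, hwx]
      rw [hA, hB]
      exact ih (a + 1) x a hb' (by omega)
    · have hxw : x < w := not_le.mp hwx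
      have hA : pvStepA (some (w, i)) (x, a) = some (w, i) := by
        simp only [pvStepA]
        have : (decide (w < x) || !decide (x < w) && decide (i < a)) = false := by
          simp [hxw, not_lt_of_gt hxw]
        simp [this]
      have hB : pvStepB (some (w, i)) (a, x) = some (w, i) := by
        simp [pvStepB, hwx]
      rw [hA, hB]
      exact ih (a + 1) w i hb' (by omega)

-- ===== VERDICT (by name: the statement is the Claim_ definition above) =====
theorem top_choice_spec : Claim_equal_top_choice := by
  intro choices weights _hDom hPre
  unfold Spec_top_choice
  cases weights with
  | none => exact absurd hPre (by simp [Pre_top_choice])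
  | some ws =>
    cases ws with
    | nil =>
      exact absurd hPre (by simp [Pre_top_choice])
    | cons x t =>
      have hfold :
          ((x :: t).zip (PySem.List.pyRange 0 (PySem.List.len (x :: t)) 1)).foldl pvStepA none =
            (PySem.List.enumerate (x :: t) 0).foldl pvStepB none := by
        rw [PySem.List.len_eq,
          PySem.List.pyRange_one_cons (by exact_mod_cast Nat.succ_pos t.length),
          PySem.List.enumerate_cons]
        simp only [List.zip_cons_cons, List.foldl_cons]
        have hA0 : pvStepA none (x, 0) = some (x, 0) := rfl
        have hB0 : pvStepB none (0, x) = some (x, 0) := rfl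
        rw [hA0, hB0]
        exact pvLock t 1 _ x 0 (by push_cast [List.length_cons]; omega) (by norm_num)
      show top_choice choices (some (x :: t)) = top_choice_alt choices (some (x :: t))
      simp only [top_choice, top_choice_alt, pvArgmax, pvMax2_eq_foldl, hfold]
      cases hres : (PySem.List.enumerate (x :: t) 0).foldl pvStepB none with
      | none => rfl
      | some bpair => rfl
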